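-- pv_equiv track=rewrite | github.com/Rajasekhar1131997/TIP102_Sessions | Unit_10/Week10Session1_SPSV2.py | get_close_friends
-- ===== SOURCE A (Python) =====
-- def get_close_friends(contacts, celeb):
--     if not contacts:
--         return []
--     graph = {}
--     for contact in contacts:
--         celebrity_a, celebrity_b = contact
--         if celebrity_a not in graph:
--             graph[celebrity_a] = []
--         if celebrity_b not in graph:
--             graph[celebrity_b] = []
--         graph[celebrity_a].append(celebrity_b)
--         graph[celebrity_b].append(celebrity_a)
--
--     return graph.get(celeb, [])
-- ===== SOURCE B (Python) =====
-- def get_close_friends(contacts, celeb):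
--     result = []
--     for contact in contacts:
--         a, b = contact
--         if a == celeb:
--             result.append(b)
--         if b == celeb:
--             result.append(a)
--     return result
-- ===== Notes on version B (the rewrite author's own statement) =====
-- stated objective: simpler
-- what changed: B drops the adjacency dict entirely and collects celeb's neighbours in one direct pass, appending the other endpoint of each matching pair.
import Mathlib
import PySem

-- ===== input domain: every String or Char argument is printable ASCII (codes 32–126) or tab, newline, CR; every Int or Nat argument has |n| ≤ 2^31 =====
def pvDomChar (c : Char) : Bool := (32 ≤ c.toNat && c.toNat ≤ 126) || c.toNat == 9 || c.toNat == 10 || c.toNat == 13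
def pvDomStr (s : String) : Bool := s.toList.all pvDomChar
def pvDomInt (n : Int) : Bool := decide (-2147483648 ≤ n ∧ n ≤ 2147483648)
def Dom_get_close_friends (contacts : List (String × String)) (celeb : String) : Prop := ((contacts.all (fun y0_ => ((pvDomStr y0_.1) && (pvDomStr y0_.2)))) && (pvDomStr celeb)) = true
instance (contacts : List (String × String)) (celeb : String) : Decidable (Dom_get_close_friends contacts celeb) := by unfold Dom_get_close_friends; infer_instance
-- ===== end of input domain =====

-- B drops the adjacency dict and collects celeb's neighbours in one direct pass (simpler; same cost).

-- ===== PORT A =====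
-- one iteration of A's loop body over the graph dict
def pvAStep (g : PySem.Dict String (List String)) (c : String × String) : PySem.Dict String (List String) :=
  let g := if g.contains c.1 then g else g.insert c.1 []
  let g := if g.contains c.2 then g else g.insert c.2 []
  let g := g.modify c.1 [] (fun l => l ++ [c.2])
  g.modify c.2 [] (fun l => l ++ [c.1])

def get_close_friends (contacts : List (String × String)) (celeb : String) : List String :=
  if contacts = [] then []
  else
    let graph := contacts.foldl pvAStep PySem.Dict.empty
    graph.getD celeb []

-- ===== PORT B =====
def get_close_friends_alt (contacts : List (String × String)) (celeb : String) : List String :=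
  contacts.foldl (fun result c =>
    let result := if c.1 = celeb then result ++ [c.2] else result
    if c.2 = celeb then result ++ [c.1] else result) []

-- ===== PRECONDITION & SPEC =====
def Spec_get_close_friends (contacts : List (String × String)) (celeb : String) (out : List String) : Prop := out = get_close_friends_alt contacts celeb
instance (contacts : List (String × String)) (celeb : String) (out : List String) : Decidable (Spec_get_close_friends contacts celeb out) := by unfold Spec_get_close_friends; infer_instance

-- ===== CLAIM (what is proved, stated in full; the proofs are below) =====
def Claim_equal_get_close_friends : Prop := ∀ (contacts : List (String × String)) (celeb : String), Dom_get_close_friends contacts celeb → Spec_get_close_friends contacts celeb (get_close_friends contacts celeb)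

-- ===== LEMMAS AND PROOFS =====

-- the conditional fresh-key inserts of A's step never change any getD … [] value
theorem pvAStep_getD (celeb : String) (g : PySem.Dict String (List String)) (c : String × String) :
    (pvAStep g c).getD celeb [] =
      (let r := if c.1 = celeb then g.getD celeb [] ++ [c.2] else g.getD celeb []
       if c.2 = celeb then r ++ [c.1] else r) := by
  unfold pvAStep
  have hins : ∀ (k : String) (g : PySem.Dict String (List String)),
      (if g.contains k then g else g.insert k []).getD celeb [] = g.getD celeb [] := by
    intro k g
    split_ifs with h
    · rfl
    · rw [PySem.Dict.getD_insert]
      split_ifs with he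
      · subst he
        symm
        rw [PySem.Dict.getD_of_not_contains]
        simpa using h
      · rfl
  simp only [PySem.Dict.getD_modify, hins]
  rcases eq_or_ne celeb c.1 with h1 | h1 <;> rcases eq_or_ne celeb c.2 with h2 | h2
  · simp [hins, ← h1, ← h2]
  · simp [hins, ← h1, h2, Ne.symm h2]
  · simp [hins, h1, Ne.symm h1, ← h2]
  · simp [h1, Ne.symm h1, h2, Ne.symm h2]

theorem pvFold_getD (celeb : String) (contacts : List (String × String))
    (g : PySem.Dict String (List String)) (acc : List String) (h : g.getD celeb [] = acc) :
    (contacts.foldl pvAStep g).getD celeb [] =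
      contacts.foldl (fun result c =>
        let result := if c.1 = celeb then result ++ [c.2] else result
        if c.2 = celeb then result ++ [c.1] else result) acc := by
  induction contacts generalizing g acc with
  | nil => simpa using h
  | cons c rest ih =>
    simp only [List.foldl_cons]
    exact ih _ _ (by rw [pvAStep_getD, h])

-- ===== VERDICT (by name: the statement is the Claim_ definition above) =====
theorem get_close_friends_spec : Claim_equal_get_close_friends := by
  intro contacts celeb _
  unfold Spec_get_close_friends get_close_friends get_close_friends_alt
  split_ifs with h
  · subst h; rfl
  · exact pvFold_getD celeb contacts PySem.Dict.empty [] rfl
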